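-- pv_equiv track=rewrite | github.com/cowrie/cowrie | src/cowrie/shell/parser.py | _find_closing_quote
-- ===== SOURCE A (Python) =====
-- def _find_closing_quote(cmd_string: str, start: int, quote: str) -> int:
--     """Return the index past the closing *quote* character.
--
--     *start* is the index of the opening quote.  Backslash escapes are
--     honoured inside double-quoted strings.  If the closing quote is
--     missing the end of the string is returned.
--     """
--     j = start + 1
--     length = len(cmd_string)
--     while j < length and cmd_string[j] != quote:
--         if cmd_string[j] == "\\" and quote == '"' and j + 1 < length:
--             j += 1  # skip escaped char in double quotes
--         j += 1
--     return j + 1 if j < length else length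
-- ===== SOURCE B (Python) =====
-- def _find_closing_quote(cmd_string: str, start: int, quote: str) -> int:
--     """Jump directly between candidate closing quotes with str.find and decide
--     each one by the parity of the backslash run before it, instead of scanning
--     character by character."""
--     length = len(cmd_string)
--     if len(quote) != 1:
--         return length  # no single character can ever equal quote
--     if quote != '"':
--         k = cmd_string.find(quote, start + 1)
--         return k + 1 if k != -1 else length
--     j = start + 1
--     while True:
--         k = cmd_string.find('"', j)
--         if k == -1:
--             return length
--         b = k - 1
--         while b > start and cmd_string[b] == "\\":
--             b -= 1
--         if (k - 1 - b) % 2 == 0: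
--             return k + 1  # even number of backslashes: the quote is not escaped
--         j = k + 1
-- ===== Notes on version B (the rewrite author's own statement) =====
-- stated objective: faster
-- what changed: Replaces A's character-by-character Python scan with lookahead escape skipping by staged substring searches: str.find jumps directly to each candidate closing quote (C-level scan) and the parity of the backslash run immediately before it decides whether it is escaped.
-- outside the precondition, e.g. on _find_closing_quote('ab"', -4, '"'): A returns 0, B returns 3; on _find_closing_quote('ab"', -9, '"'): A raises IndexError, B returns 3
import Mathlib
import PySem

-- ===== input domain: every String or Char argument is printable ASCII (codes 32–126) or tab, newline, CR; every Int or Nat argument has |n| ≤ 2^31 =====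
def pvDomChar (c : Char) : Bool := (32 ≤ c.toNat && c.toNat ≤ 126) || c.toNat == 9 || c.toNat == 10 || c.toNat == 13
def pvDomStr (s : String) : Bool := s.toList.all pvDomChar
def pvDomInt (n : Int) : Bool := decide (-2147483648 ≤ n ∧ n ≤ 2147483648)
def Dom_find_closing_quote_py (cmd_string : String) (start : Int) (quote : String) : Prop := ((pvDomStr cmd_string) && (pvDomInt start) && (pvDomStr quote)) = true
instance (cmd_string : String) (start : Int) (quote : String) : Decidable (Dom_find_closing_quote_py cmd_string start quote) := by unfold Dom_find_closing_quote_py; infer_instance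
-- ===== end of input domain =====

-- B replaces A's character-by-character scan (with lookahead escape skip) by staged str.find
-- jumps to each candidate closing quote, deciding each by the parity of the backslash run
-- before it (objective: faster — measured). Loops are ported with a Nat
-- fuel that is provably sufficient (fuel only makes the same computation total).

-- ===== PORT A =====
-- A's while loop: advance by 1, or by 2 when skipping a backslash-escaped char in double quotes.
def pvLoopA (s : List Char) (quote : String) (L : Int) : Nat → Int → Int
  | 0, j => j
  | fuel + 1, j =>
    if j < L then
      match PySem.List.pyGet? s j with
      | none => j  -- IndexError in Python (j < -len); excluded by Pre_
      | some c =>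
        if String.ofList [c] ≠ quote then
          if String.ofList [c] = "\\" ∧ quote = "\"" ∧ j + 1 < L then
            pvLoopA s quote L fuel (j + 2)
          else
            pvLoopA s quote L fuel (j + 1)
        else j
    else j

def find_closing_quote_py (cmd_string : String) (start : Int) (quote : String) : Int :=
  let length := PySem.Str.len cmd_string
  let j := pvLoopA cmd_string.toList quote length ((length - (start + 1)).toNat) (start + 1)
  if j < length then j + 1 else length

-- ===== PORT B =====
-- Source B's inner while: walk b left over the backslash run (stopping above start).
def pvBackStop (s : List Char) (start : Int) : Nat → Int → Int
  | 0, b => b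
  | fuel + 1, b =>
    if start < b ∧ String.ofList [s.getD b.toNat ' '] = "\\" then
      pvBackStop s start fuel (b - 1)
    else b

-- Source B's outer while: find the next '"', accept it iff the backslash run before it is even.
def pvLoopB2 (s : List Char) (start : Int) : Nat → Int → Int
  | 0, _ => (s.length : Int)
  | fuel + 1, j =>
    let k := PySem.Chars.findFrom s ['"'] j none
    if k = -1 then (s.length : Int)
    else
      let b := pvBackStop s start ((k - 1 - start).toNat) (k - 1)
      if PySem.Int.mod (k - 1 - b) 2 = 0 then k + 1
      else pvLoopB2 s start fuel (k + 1)

def find_closing_quote_py_alt (cmd_string : String) (start : Int) (quote : String) : Int :=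
  let s := cmd_string.toList
  let length : Int := (s.length : Int)
  if PySem.Str.len quote ≠ 1 then length  -- no single character can ever equal quote
  else if quote ≠ "\"" then
    let k := PySem.Chars.findFrom s quote.toList (start + 1) none
    if k ≠ -1 then k + 1 else length
  else pvLoopB2 s start ((length - (start + 1)).toNat) (start + 1)

-- ===== PRECONDITION & SPEC =====
-- Pre_ excludes negative scan starts (start + 1 < 0): there A raises IndexError (start+1 < -len)
-- or returns a value via Python's negative-index wraparound while B's str.find clamps negative
-- starts to 0 — an accidental corner (start is the index of the opening quote, so start ≥ 0 in use).
def Pre_find_closing_quote_py (cmd_string : String) (start : Int) (quote : String) : Prop :=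
  0 ≤ start + 1
instance (cmd_string : String) (start : Int) (quote : String) : Decidable (Pre_find_closing_quote_py cmd_string start quote) := by unfold Pre_find_closing_quote_py; infer_instance

def pvWitness_find_closing_quote_py : String × Int × String := ("\"a\\\"b\" c", 0, "\"")

def Spec_find_closing_quote_py (cmd_string : String) (start : Int) (quote : String) (out : Int) : Prop := out = find_closing_quote_py_alt cmd_string start quote
instance (cmd_string : String) (start : Int) (quote : String) (out : Int) : Decidable (Spec_find_closing_quote_py cmd_string start quote out) := by unfold Spec_find_closing_quote_py; infer_instance

-- ===== CLAIM (what is proved, stated in full; the proofs are below) =====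
def Claim_equal_find_closing_quote_py : Prop := ∀ (cmd_string : String) (start : Int) (quote : String), Dom_find_closing_quote_py cmd_string start quote → Pre_find_closing_quote_py cmd_string start quote → Spec_find_closing_quote_py cmd_string start quote (find_closing_quote_py cmd_string start quote)

-- ===== LEMMAS AND PROOFS =====

theorem pvCharStr (c q : Char) : String.ofList [c] = String.ofList [q] ↔ c = q := by
  constructor
  · intro h; have := congrArg String.toList h; simpa using this
  · intro h; rw [h]

theorem pvQuoteLit : ("\"" : String) = String.ofList ['"'] := rfl
theorem pvBackLit : ("\\" : String) = String.ofList ['\\'] := rfl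

theorem pvSingPrefix (q : Char) (t : List Char) : [q] <+: t ↔ t.head? = some q := by
  cases t with
  | nil => simp
  | cons a t => simp [List.cons_prefix_cons, eq_comm]

theorem pvFindBounds (s : List Char) (q : Char) (j : Int)
    (h : PySem.Chars.findFrom s [q] j none ≠ -1) :
    j ≤ PySem.Chars.findFrom s [q] j none ∧ 0 ≤ PySem.Chars.findFrom s [q] j none ∧
      PySem.Chars.findFrom s [q] j none < (s.length : Int) ∧
      s[(PySem.Chars.findFrom s [q] j none).toNat]? = some q := by
  simp only [PySem.Chars.findFrom, Int.toNat_natCast, List.take_length] at h ⊢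
  set c : Int := (if j < 0 then if j + ↑s.length < 0 then 0 else j + ↑s.length else j) with hc
  have hc0 : 0 ≤ c ∧ j ≤ c := by rw [hc]; constructor <;> (split <;> omega)
  by_cases hcl : (s.length : Int) < c
  · simp [hcl] at h
  · rw [if_neg hcl] at h ⊢
    set f := PySem.Chars.find (List.drop c.toNat s) [q] with hf
    by_cases hfe : f = -1
    · rw [if_pos hfe] at h; exact absurd rfl h
    · rw [if_neg hfe] at h ⊢
      have hf0 : 0 ≤ f := by have := PySem.Chars.neg_one_le_find (List.drop c.toNat s) [q]; omega
      have hspec := PySem.Chars.find_spec (s := List.drop c.toNat s) (sub := [q]) (by rw [← hf]; exact hf0)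
      rw [← hf] at hspec
      obtain ⟨hpre, -⟩ := hspec
      rw [List.drop_drop, pvSingPrefix, List.head?_drop] at hpre
      have hlt : c.toNat + f.toNat < s.length := (List.getElem?_eq_some_iff.mp hpre).1
      refine ⟨by omega, by omega, by omega, ?_⟩
      have : (c + f).toNat = c.toNat + f.toNat := by omega
      rw [this]; exact hpre

-- if find('"', j) misses, no position in [j, len) holds the quote char
theorem pvFindNone (s : List Char) (q : Char) (j : Int) (hj : 0 ≤ j)
    (h : PySem.Chars.findFrom s [q] j none = -1) :
    ∀ i : Int, j ≤ i → i < (s.length : Int) → s[i.toNat]? ≠ some q := by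
  intro i hji hil hsome
  simp only [PySem.Chars.findFrom, Int.toNat_natCast, List.take_length] at h
  rw [if_neg (by omega : ¬ (s.length : Int) < (if j < 0 then if j + ↑s.length < 0 then 0 else j + ↑s.length else j))] at h
  rw [if_neg (by omega : ¬ j < 0)] at h
  by_cases hfe : PySem.Chars.find (List.drop j.toNat s) [q] = -1
  · rw [PySem.Chars.find_eq_neg_one_iff, List.singleton_infix_iff] at hfe
    apply hfe
    have : i.toNat = j.toNat + (i.toNat - j.toNat) := by omega
    rw [this] at hsome
    rw [← List.getElem?_drop] at hsome
    exact List.mem_of_getElem? hsome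
  · rw [if_neg hfe] at h
    have hf0 : 0 ≤ PySem.Chars.find (List.drop j.toNat s) [q] := by
      have := PySem.Chars.neg_one_le_find (List.drop j.toNat s) [q]; omega
    omega

-- find('"', j) points at the FIRST occurrence at or after j
theorem pvFindMin (s : List Char) (q : Char) (j : Int) (hj : 0 ≤ j)
    (h : PySem.Chars.findFrom s [q] j none ≠ -1) :
    ∀ i : Int, j ≤ i → i < PySem.Chars.findFrom s [q] j none → s[i.toNat]? ≠ some q := by
  intro i hji hik hsome
  simp only [PySem.Chars.findFrom, Int.toNat_natCast, List.take_length] at h hik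
  rw [if_neg (by omega : ¬ j < 0)] at h hik
  have hjl : ¬ (s.length : Int) < j := by
    intro hcon; rw [if_pos hcon] at h; exact h rfl
  rw [if_neg hjl] at h hik
  by_cases hfe : PySem.Chars.find (List.drop j.toNat s) [q] = -1
  · rw [if_pos hfe] at h; exact h rfl
  · rw [if_neg hfe] at hik
    have hf0 : 0 ≤ PySem.Chars.find (List.drop j.toNat s) [q] := by
      have := PySem.Chars.neg_one_le_find (List.drop j.toNat s) [q]; omega
    obtain ⟨-, hmin⟩ := PySem.Chars.find_spec (s := List.drop j.toNat s) (sub := [q]) hf0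
    apply hmin (i.toNat - j.toNat) (by omega)
    rw [List.drop_drop, pvSingPrefix, List.head?_drop]
    have : j.toNat + (i.toNat - j.toNat) = i.toNat := by omega
    rw [this]; exact hsome

-- canonically fuelled runs of the two loops (proof-side views of the ports)
def pvRunA (s : List Char) (quote : String) (L : Int) (j : Int) : Int :=
  pvLoopA s quote L ((L - j).toNat) j

def pvRunB (s : List Char) (start : Int) (j : Int) : Int :=
  pvLoopB2 s start (((s.length : Int) - j).toNat) j

theorem pvLoopA_stop (s : List Char) (quote : String) (L : Int) (fuel : Nat) (j : Int)
    (h : ¬ j < L) : pvLoopA s quote L fuel j = j := by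
  cases fuel with
  | zero => rfl
  | succ fuel => rw [pvLoopA, if_neg h]

-- the fuel is irrelevant once it is sufficient
theorem pvLoopA_fuel (s : List Char) (quote : String) (L : Int) :
    ∀ (n m : Nat) (j : Int), (L - j).toNat ≤ n → (L - j).toNat ≤ m →
      pvLoopA s quote L n j = pvLoopA s quote L m j := by
  intro n
  induction n with
  | zero =>
    intro m j hn hm
    have h : ¬ j < L := by omega
    rw [pvLoopA_stop s quote L 0 j h, pvLoopA_stop s quote L m j h]
  | succ n ih =>
    intro m j hn hm
    by_cases hlt : j < L
    · cases m with
      | zero => omega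
      | succ m =>
        rw [pvLoopA, pvLoopA]
        rw [if_pos hlt, if_pos hlt]
        cases hget : PySem.List.pyGet? s j with
        | none => rfl
        | some c =>
          simp only
          split
          · split
            · exact ih m (j + 2) (by omega) (by omega)
            · exact ih m (j + 1) (by omega) (by omega)
          · rfl
    · rw [pvLoopA_stop s quote L _ j hlt, pvLoopA_stop s quote L m j hlt]

theorem pvRunA_stop (s : List Char) (quote : String) (L : Int) (j : Int) (h : ¬ j < L) :
    pvRunA s quote L j = j := pvLoopA_stop s quote L _ j h

-- the canonical run satisfies the loop's one-step equation
theorem pvRunA_eq (s : List Char) (quote : String) (L : Int) (j : Int) (hlt : j < L)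
    (c : Char) (hc : PySem.List.pyGet? s j = some c) :
    pvRunA s quote L j =
      (if String.ofList [c] ≠ quote then
        if String.ofList [c] = "\\" ∧ quote = "\"" ∧ j + 1 < L then
          pvRunA s quote L (j + 2)
        else pvRunA s quote L (j + 1)
      else j) := by
  have h0 : (L - j).toNat ≠ 0 := by omega
  obtain ⟨m, hm⟩ := Nat.exists_eq_succ_of_ne_zero h0
  unfold pvRunA
  rw [hm, pvLoopA, if_pos hlt, hc]
  simp only
  split
  · split
    · exact pvLoopA_fuel s quote L m _ (j + 2) (by omega) le_rfl
    · exact pvLoopA_fuel s quote L m _ (j + 1) (by omega) le_rfl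
  · rfl

-- A's loop runs to the end when no char from j on matches quote
theorem pvScanNoQuote (s : List Char) (quote : String) :
    ∀ (n : Nat) (j : Int), ((s.length : Int) - j).toNat ≤ n → 0 ≤ j →
      (∀ (i : Int) (c : Char), j ≤ i → s[i.toNat]? = some c → String.ofList [c] ≠ quote) →
      (s.length : Int) ≤ pvRunA s quote (s.length : Int) j := by
  intro n
  induction n with
  | zero =>
    intro j hn _ _
    have h : ¬ j < (s.length : Int) := by omega
    rw [pvRunA_stop s quote _ j h]; omega
  | succ n ih =>
    intro j hn hj hnq
    by_cases hlt : j < (s.length : Int)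
    · have hjn : j.toNat < s.length := by omega
      have hc : PySem.List.pyGet? s j = some s[j.toNat] := by
        rw [PySem.List.pyGet?_of_nonneg s hj]; simp [hjn]
      rw [pvRunA_eq s quote _ j hlt s[j.toNat] hc]
      have hne : String.ofList [s[j.toNat]] ≠ quote :=
        hnq j s[j.toNat] le_rfl (by simp [hjn])
      simp only [hne, ne_eq, not_false_iff, if_true]
      split
      · exact ih (j + 2) (by omega) (by omega) (fun i c hi => hnq i c (by omega))
      · exact ih (j + 1) (by omega) (by omega) (fun i c hi => hnq i c (by omega))
    · rw [pvRunA_stop s quote _ j hlt]; omega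

-- A's loop, with a non-double-quote quote, stops exactly at the first match k
theorem pvScanToQuote (s : List Char) (quote : String) (hqd : quote ≠ "\"") :
    ∀ (n : Nat) (j k : Int), (k - j).toNat ≤ n → 0 ≤ j → j ≤ k → k < (s.length : Int) →
      (∀ c : Char, s[k.toNat]? = some c → String.ofList [c] = quote) →
      (∀ (i : Int) (c : Char), j ≤ i → i < k → s[i.toNat]? = some c → String.ofList [c] ≠ quote) →
      pvRunA s quote (s.length : Int) j = k := by
  intro n
  induction n with
  | zero =>
    intro j k hn hj hjk hkL hmatch hmin
    have hjk' : j = k := by omega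
    subst hjk'
    have hjn : j.toNat < s.length := by omega
    have hc : PySem.List.pyGet? s j = some s[j.toNat] := by
      rw [PySem.List.pyGet?_of_nonneg s hj]; simp [hjn]
    rw [pvRunA_eq s quote _ j hkL s[j.toNat] hc]
    have heq : String.ofList [s[j.toNat]] = quote := hmatch s[j.toNat] (by simp [hjn])
    simp [heq]
  | succ n ih =>
    intro j k hn hj hjk hkL hmatch hmin
    by_cases hjk' : j = k
    · exact ih j k (by omega) hj hjk hkL hmatch hmin
    · have hjlt : j < k := by omega
      have hjn : j.toNat < s.length := by omega
      have hc : PySem.List.pyGet? s j = some s[j.toNat] := by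
        rw [PySem.List.pyGet?_of_nonneg s hj]; simp [hjn]
      rw [pvRunA_eq s quote _ j (by omega) s[j.toNat] hc]
      have hne : String.ofList [s[j.toNat]] ≠ quote :=
        hmin j s[j.toNat] le_rfl hjlt (by simp [hjn])
      simp only [hne, ne_eq, not_false_iff, if_true]
      have hnb : ¬ (String.ofList [s[j.toNat]] = "\\" ∧ quote = "\"" ∧ j + 1 < (s.length : Int)) := by
        intro hcon; exact hqd hcon.2.1
      rw [if_neg hnb]
      exact ih (j + 1) k (by omega) (by omega) (by omega) hkL hmatch
        (fun i c hi => hmin i c (by omega))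

-- A's loop (quote = '"') passes unchanged from j to the start r of the backslash run:
-- no '"' in [j,r) and no backslash immediately before r (from j on)
theorem pvReachRun (s : List Char) :
    ∀ (n : Nat) (j r : Int), (r - j).toNat ≤ n → 0 ≤ j → j ≤ r → r < (s.length : Int) →
      (∀ i : Int, j ≤ i → i < r → s[i.toNat]? ≠ some '"') →
      (∀ p : Int, j ≤ p → p + 1 = r → s[p.toNat]? ≠ some '\\') →
      pvRunA s "\"" (s.length : Int) j = pvRunA s "\"" (s.length : Int) r := by
  intro n
  induction n with
  | zero =>
    intro j r hn _ hjr _ _ _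
    have : j = r := by omega
    rw [this]
  | succ n ih =>
    intro j r hn hj hjr hrL hnq hns
    by_cases hjr' : j = r
    · rw [hjr']
    · have hjlt : j < r := by omega
      have hjn : j.toNat < s.length := by omega
      have hc : PySem.List.pyGet? s j = some s[j.toNat] := by
        rw [PySem.List.pyGet?_of_nonneg s hj]; simp [hjn]
      have hget : s[j.toNat]? = some s[j.toNat] := by simp [hjn]
      have hnq' : s[j.toNat] ≠ '"' := by
        intro hcon; exact hnq j le_rfl hjlt (by rw [hget, hcon])
      have hne : String.ofList [s[j.toNat]] ≠ "\"" := by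
        rw [pvQuoteLit]; simp only [ne_eq, pvCharStr]; exact hnq'
      rw [pvRunA_eq s "\"" _ j (by omega) s[j.toNat] hc]
      simp only [hne, ne_eq, not_false_iff, if_true]
      by_cases hbs : String.ofList [s[j.toNat]] = "\\"
      · have hbc : s[j.toNat] = '\\' := by rwa [pvBackLit, pvCharStr] at hbs
        have hpr : j + 1 ≠ r := by
          intro hcon; exact hns j le_rfl hcon (by rw [hget, hbc])
        have hlt2 : j + 1 < (s.length : Int) := by omega
        rw [if_pos (by refine ⟨?_, ?_, hlt2⟩ <;> first | exact hbs | trivial)]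
        exact ih (j + 2) r (by omega) (by omega) (by omega) hrL
          (fun i hi => hnq i (by omega)) (fun p hp => hns p (by omega))
      · have hnb : ¬ (String.ofList [s[j.toNat]] = "\\" ∧ True ∧ j + 1 < (s.length : Int)) := by
          intro hcon; exact hbs hcon.1
        rw [if_neg hnb]
        exact ih (j + 1) r (by omega) (by omega) (by omega) hrL
          (fun i hi => hnq i (by omega)) (fun p hp => hns p (by omega))

-- A's loop over a pure backslash run [r,k) ending at a '"': even run stops on the quote,
-- odd run skips it and continues from k+1
theorem pvRunToQuote (s : List Char) :
    ∀ (n : Nat) (r k : Int), (k - r).toNat ≤ n → 0 ≤ r → r ≤ k → k < (s.length : Int) →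
      s[k.toNat]? = some '"' →
      (∀ i : Int, r ≤ i → i < k → s[i.toNat]? = some '\\') →
      pvRunA s "\"" (s.length : Int) r =
        (if (k - r) % 2 = 0 then k else pvRunA s "\"" (s.length : Int) (k + 1)) := by
  intro n
  induction n with
  | zero =>
    intro r k hn hr hrk hkL hq _
    have hrk' : r = k := by omega
    subst hrk'
    have hrn : r.toNat < s.length := by omega
    have hc : PySem.List.pyGet? s r = some s[r.toNat] := by
      rw [PySem.List.pyGet?_of_nonneg s hr]; simp [hrn]
    have hqc : s[r.toNat] = '"' := by
      have : s[r.toNat]? = some s[r.toNat] := by simp [hrn]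
      rw [this] at hq; exact Option.some.inj hq
    rw [pvRunA_eq s "\"" _ r hkL s[r.toNat] hc, hqc]
    simp
  | succ n ih =>
    intro r k hn hr hrk hkL hq hbs
    by_cases hrk' : r = k
    · exact ih r k (by omega) hr hrk hkL hq hbs
    · have hrlt : r < k := by omega
      have hrn : r.toNat < s.length := by omega
      have hc : PySem.List.pyGet? s r = some s[r.toNat] := by
        rw [PySem.List.pyGet?_of_nonneg s hr]; simp [hrn]
      have hbc : s[r.toNat] = '\\' := by
        have hg : s[r.toNat]? = some s[r.toNat] := by simp [hrn]
        have := hbs r le_rfl hrlt; rw [hg] at this; exact Option.some.inj this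
      rw [pvRunA_eq s "\"" _ r (by omega) s[r.toNat] hc, hbc]
      have hne : String.ofList ['\\'] ≠ "\"" := by decide
      simp only [hne, ne_eq, not_false_iff, if_true]
      have hlt2 : r + 1 < (s.length : Int) := by omega
      rw [if_pos (by refine ⟨?_, ?_, hlt2⟩ <;> trivial)]
      by_cases hlast : r + 1 = k
      · -- odd run: skip lands past the quote
        have : r + 2 = k + 1 := by omega
        rw [this]
        have hodd : ¬ (k - r) % 2 = 0 := by omega
        rw [if_neg hodd]
      · have := ih (r + 2) k (by omega) (by omega) (by omega) hkL hq
          (fun i hi => hbs i (by omega))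
        rw [this]
        by_cases hpar : (k - r) % 2 = 0
        · rw [if_pos (by omega : (k - (r + 2)) % 2 = 0), if_pos hpar]
        · rw [if_neg (by omega : ¬ (k - (r + 2)) % 2 = 0), if_neg hpar]

-- Source B's inner while with its canonical fuel: its stop b lies in [start, b0], everything in
-- (b, b0] is a backslash, and b is start or not a backslash
theorem pvBackStopFacts (s : List Char) (start : Int) :
    ∀ (n : Nat) (b : Int), (b - start).toNat = n → start ≤ b →
      start ≤ pvBackStop s start n b ∧ pvBackStop s start n b ≤ b ∧
      (∀ i : Int, pvBackStop s start n b < i → i ≤ b → s.getD i.toNat ' ' = '\\') ∧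
      (pvBackStop s start n b = start ∨ ¬ String.ofList [s.getD (pvBackStop s start n b).toNat ' '] = "\\") := by
  intro n
  induction n with
  | zero =>
    intro b hn hb
    have hbe : b = start := by omega
    simp only [pvBackStop]
    exact ⟨by omega, le_rfl, fun i hi hi2 => by omega, Or.inl hbe⟩
  | succ n ih =>
    intro b hn hb
    rw [pvBackStop]
    by_cases hcond : start < b ∧ String.ofList [s.getD b.toNat ' '] = "\\"
    · rw [if_pos hcond]
      obtain ⟨h1, h2, h3, h4⟩ := ih (b - 1) (by omega) (by omega)
      refine ⟨h1, by omega, ?_, h4⟩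
      intro i hi1 hi2
      by_cases hib : i = b
      · rw [hib]
        have hc2 := hcond.2
        rwa [pvBackLit, pvCharStr] at hc2
      · exact h3 i hi1 (by omega)
    · rw [if_neg hcond]
      refine ⟨hb, le_rfl, fun i hi hi2 => by omega, ?_⟩
      by_cases hsb : start < b
      · right; intro hcon; exact hcond ⟨hsb, hcon⟩
      · left; omega

theorem pvLoopB2_fuel (s : List Char) (start : Int) :
    ∀ (n m : Nat) (j : Int), ((s.length : Int) - j).toNat ≤ n → ((s.length : Int) - j).toNat ≤ m →
      pvLoopB2 s start n j = pvLoopB2 s start m j := by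
  intro n
  induction n with
  | zero =>
    intro m j hn hm
    have hk : PySem.Chars.findFrom s ['"'] j none = -1 := by
      by_contra hne
      have := pvFindBounds s '"' j hne
      omega
    cases m with
    | zero => rfl
    | succ m => simp [pvLoopB2, hk]
  | succ n ih =>
    intro m j hn hm
    by_cases hk : PySem.Chars.findFrom s ['"'] j none = -1
    · cases m with
      | zero => simp [pvLoopB2, hk]
      | succ m => simp [pvLoopB2, hk]
    · obtain ⟨hjk, hk0, hkL, -⟩ := pvFindBounds s '"' j hk
      cases m with
      | zero => omega
      | succ m =>
        simp only [pvLoopB2, hk, if_neg, not_false_iff]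
        split
        · rfl
        · exact ih m (PySem.Chars.findFrom s ['"'] j none + 1) (by omega) (by omega)

-- the canonical B run satisfies the loop's one-step equation
theorem pvRunB_eq (s : List Char) (start : Int) (j : Int) :
    pvRunB s start j =
      (if PySem.Chars.findFrom s ['"'] j none = -1 then (s.length : Int)
      else
        if PySem.Int.mod (PySem.Chars.findFrom s ['"'] j none - 1 -
            pvBackStop s start ((PySem.Chars.findFrom s ['"'] j none - 1 - start).toNat)
              (PySem.Chars.findFrom s ['"'] j none - 1)) 2 = 0 then
          PySem.Chars.findFrom s ['"'] j none + 1
        else pvRunB s start (PySem.Chars.findFrom s ['"'] j none + 1)) := by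
  by_cases hk : PySem.Chars.findFrom s ['"'] j none = -1
  · rw [if_pos hk]
    unfold pvRunB
    cases hn : (((s.length : Int) - j)).toNat with
    | zero => rfl
    | succ m => simp [pvLoopB2, hk]
  · rw [if_neg hk]
    obtain ⟨hjk, hk0, hkL, -⟩ := pvFindBounds s '"' j hk
    unfold pvRunB
    cases hn : (((s.length : Int) - j)).toNat with
    | zero => omega
    | succ m =>
      simp only [pvLoopB2, hk, if_neg, not_false_iff]
      split
      · rfl
      · exact pvLoopB2_fuel s start m _ (PySem.Chars.findFrom s ['"'] j none + 1)
          (by omega) le_rfl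

-- the main loop equivalence for quote = '"': A's wrapped scan from j equals B's staged loop,
-- given j is the scan start or just past a previously skipped quote
theorem pvLoopEqDq (s : List Char) (start : Int) (hstart : -1 ≤ start) :
    ∀ (n : Nat) (j : Int), ((s.length : Int) - j).toNat ≤ n → start + 1 ≤ j →
      (j = start + 1 ∨ (1 ≤ j ∧ s[(j - 1).toNat]? = some '"')) →
      (if pvRunA s "\"" (s.length : Int) j < (s.length : Int)
        then pvRunA s "\"" (s.length : Int) j + 1 else (s.length : Int)) = pvRunB s start j := by
  intro n
  induction n with
  | zero =>
    intro j hn hsj _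
    have hge : ¬ j < (s.length : Int) := by omega
    have hk : PySem.Chars.findFrom s ['"'] j none = -1 := by
      by_contra hne
      have := pvFindBounds s '"' j hne
      omega
    rw [pvRunB_eq, if_pos hk]
    rw [pvRunA_stop s _ _ j hge, if_neg hge]
  | succ n ih =>
    intro j hn hsj hinv
    have hj : 0 ≤ j := by omega
    by_cases hk : PySem.Chars.findFrom s ['"'] j none = -1
    · rw [pvRunB_eq, if_pos hk]
      have hnone := pvFindNone s '"' j hj hk
      have hres := pvScanNoQuote s "\"" ((s.length : Int) - j).toNat j le_rfl hj
        (by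
          intro i c hi hget hcon
          rw [pvQuoteLit, pvCharStr] at hcon
          subst hcon
          by_cases hil : i < (s.length : Int)
          · exact hnone i hi hil hget
          · have : i.toNat < s.length := (List.getElem?_eq_some_iff.mp hget).1
            omega)
      rw [if_neg (by omega)]
    · set k := PySem.Chars.findFrom s ['"'] j none with hkdef
      obtain ⟨hjk, hk0, hkL, hkq⟩ := pvFindBounds s '"' j hk
      have hmin := pvFindMin s '"' j hj hk
      rw [pvRunB_eq, if_neg hk]
      set b := pvBackStop s start ((k - 1 - start).toNat) (k - 1) with hbdef
      obtain ⟨hb1, hb2, hb3, hb4⟩ :=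
        pvBackStopFacts s start ((k - 1 - start).toNat) (k - 1) rfl (by omega)
      rw [← hbdef] at hb1 hb2 hb3 hb4
      -- the run cannot extend below j
      have hbj : j - 1 ≤ b := by
        by_contra hcon
        have hrange : 0 ≤ j - 1 ∧ j - 1 < (s.length : Int) := by omega
        have hbl : s.getD (j - 1).toNat ' ' = '\\' := hb3 (j - 1) (by omega) (by omega)
        have hgl : s[(j - 1).toNat]? = some '\\' := by
          have hlen : (j - 1).toNat < s.length := by omega
          rw [List.getD_eq_getElem?_getD, List.getElem?_eq_getElem hlen, Option.getD_some] at hbl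
          rw [List.getElem?_eq_getElem hlen, hbl]
        rcases hinv with hinv | ⟨hj1, hinv⟩
        · omega
        · rw [hinv] at hgl; exact absurd (Option.some.inj hgl) (by decide)
      -- everything in [b+1, k) is a backslash (as getElem?)
      have hrun : ∀ i : Int, b + 1 ≤ i → i < k → s[i.toNat]? = some '\\' := by
        intro i hi1 hi2
        have hlen : i.toNat < s.length := by omega
        have := hb3 i (by omega) (by omega)
        rw [List.getD_eq_getElem?_getD, List.getElem?_eq_getElem hlen, Option.getD_some] at this
        rw [List.getElem?_eq_getElem hlen, this]
      -- A reaches b+1 unchanged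
      have hreach := pvReachRun s (b + 1 - j).toNat j (b + 1) le_rfl hj (by omega) (by omega)
        (by
          intro i hi1 hi2 hcon
          exact hmin i hi1 (by omega) hcon)
        (by
          intro p hp1 hp2 hcon
          have hpb : p = b := by omega
          subst hpb
          rcases hb4 with hb4 | hb4
          · omega
          · apply hb4
            rw [pvBackLit, pvCharStr]
            have hlen : b.toNat < s.length := by omega
            rw [List.getElem?_eq_getElem hlen] at hcon
            rw [List.getD_eq_getElem?_getD, List.getElem?_eq_getElem hlen, Option.getD_some]
            exact Option.some.inj hcon)
      have hrunres := pvRunToQuote s (k - (b + 1)).toNat (b + 1) k le_rfl (by omega) (by omega)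
        hkL hkq (fun i hi1 hi2 => hrun i hi1 hi2)
      rw [hreach, hrunres]
      have hmod : PySem.Int.mod (k - 1 - b) 2 = (k - 1 - b) % 2 :=
        PySem.Int.mod_eq_emod_of_pos (by omega)
      by_cases hpar : (k - (b + 1)) % 2 = 0
      · rw [if_pos hpar, if_pos hkL,
          if_pos (show PySem.Int.mod (k - 1 - b) 2 = 0 by rw [hmod]; omega)]
      · rw [if_neg hpar,
          if_neg (show ¬ PySem.Int.mod (k - 1 - b) 2 = 0 by rw [hmod]; omega)]
        exact ih (k + 1) (by omega) (by omega)
          (Or.inr ⟨by omega, by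
            have he : k + 1 - 1 = k := by omega
            rw [he]; exact hkq⟩)

-- ===== VERDICT (by name: the statement is the Claim_ definition above) =====
theorem find_closing_quote_py_spec : Claim_equal_find_closing_quote_py := by
  intro cmd_string start quote _ hpre
  unfold Spec_find_closing_quote_py
  unfold Pre_find_closing_quote_py at hpre
  simp only [find_closing_quote_py, find_closing_quote_py_alt, PySem.Str.len_eq]
  set s := cmd_string.toList with hs
  show (if pvRunA s quote (s.length : Int) (start + 1) < (s.length : Int)
    then pvRunA s quote (s.length : Int) (start + 1) + 1 else (s.length : Int)) = _
  by_cases hlq : (quote.toList.length : Int) ≠ 1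
  · -- quote is not a single character: no char ever matches, A runs to the end
    rw [if_pos hlq]
    have hres := pvScanNoQuote s quote ((s.length : Int) - (start + 1)).toNat (start + 1) le_rfl hpre
      (by
        intro i c hi hget hcon
        apply hlq
        rw [← hcon]
        simp)
    rw [if_neg (by omega)]
  · rw [if_neg hlq]
    obtain ⟨q, hq⟩ : ∃ q, quote.toList = [q] := by
      have : quote.toList.length = 1 := by omega
      cases hql : quote.toList with
      | nil => rw [hql] at this; simp at this
      | cons a t =>
        rw [hql] at this; simp at this
        exact ⟨a, by rw [this]⟩
    have hquote : quote = String.ofList [q] := by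
      rw [← hq]; exact String.ofList_toList.symm
    by_cases hqd : quote ≠ "\""
    · rw [if_pos hqd, hq]
      by_cases hk : PySem.Chars.findFrom s [q] (start + 1) none = -1
      · rw [hk, if_neg (show ¬ ¬ ((-1 : Int) = -1) by simp)]
        have hnone := pvFindNone s q (start + 1) hpre hk
        have hres := pvScanNoQuote s quote ((s.length : Int) - (start + 1)).toNat (start + 1) le_rfl hpre
          (by
            intro i c hi hget hcon
            rw [hquote, pvCharStr] at hcon
            subst hcon
            by_cases hil : i < (s.length : Int)
            · exact hnone i hi hil hget
            · have : i.toNat < s.length := (List.getElem?_eq_some_iff.mp hget).1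
              omega)
        rw [if_neg (by omega)]
      · rw [if_pos hk]
        obtain ⟨hjk, hk0, hkL, hkq⟩ := pvFindBounds s q (start + 1) hk
        have hmin := pvFindMin s q (start + 1) hpre hk
        have hres := pvScanToQuote s quote hqd
          ((PySem.Chars.findFrom s [q] (start + 1) none) - (start + 1)).toNat (start + 1)
          (PySem.Chars.findFrom s [q] (start + 1) none) le_rfl hpre hjk hkL
          (by
            intro c hget
            rw [hkq] at hget
            rw [← Option.some.inj hget, hquote])
          (by
            intro i c hi1 hi2 hget hcon
            rw [hquote, pvCharStr] at hcon
            subst hcon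
            exact hmin i hi1 hi2 hget)
        rw [hres, if_pos hkL]
    · rw [if_neg hqd]
      have hqe : quote = "\"" := by simpa using hqd
      subst hqe
      exact pvLoopEqDq s start (by omega) ((s.length : Int) - (start + 1)).toNat (start + 1)
        le_rfl le_rfl (Or.inl rfl)
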